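-- pv_equiv track=rewrite | github.com/Mexidis/omega_up_discretas | relaciones_patrick.py | verificar_relacion
-- ===== SOURCE A (Python) =====
-- def es_reflexiva(relacion, conjunto):
--     # Verificar que para cada elemento exista al menos un par reflexivo
--     for elemento in conjunto:
--         tiene_par_reflexivo = any((a, b) in relacion for a, b in relacion if a == elemento and b == elemento)
--         if not tiene_par_reflexivo:
--             return False
--
--     return True
--
-- def verificar_relacion(conjunto, n, relaciones):
--     reflexiva = es_reflexiva(relaciones, conjunto)
--     simetrica = True
--     transitiva = True
--
--     # Verificar propiedad simétrica
--     for a, b in relaciones: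
--         if (b, a) not in relaciones:
--             simetrica = False
--
--     # Verificar propiedad transitiva
--     for a, b in relaciones:
--         for c, d in relaciones:
--             if b == c and (a, d) not in relaciones:
--                 transitiva = False
--
--     # Determinar el tipo de relación
--     if reflexiva and simetrica and transitiva:
--         return "Equivalencia"
--     elif reflexiva:
--         return "Reflexiva"
--     elif simetrica:
--         return "Simétrica"
--     elif transitiva:
--         return "Transitiva"
--     else:
--         return "No"
-- ===== SOURCE B (Python) =====
-- def verificar_relacion(conjunto, n, relaciones):
--     rel = set(relaciones)
--     succ = {}
--     for a, b in rel:
--         succ.setdefault(a, []).append(b)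
--     reflexiva = all((x, x) in rel for x in conjunto)
--     simetrica = all((b, a) in rel for a, b in rel)
--     transitiva = all((a, d) in rel for a, b in rel for d in succ.get(b, ()))
--     if reflexiva and simetrica and transitiva:
--         return "Equivalencia"
--     if reflexiva:
--         return "Reflexiva"
--     if simetrica:
--         return "Simétrica"
--     if transitiva:
--         return "Transitiva"
--     return "No"
-- ===== Notes on version B (the rewrite author's own statement) =====
-- stated objective: faster
-- what changed: B deduplicates the pairs into a set for O(1)-style membership, checks reflexivity/symmetry against that set, and replaces A's nested quadratic transitivity scan (with a linear membership test inside) by a successor index keyed on the first component of each pair.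
import Mathlib
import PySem

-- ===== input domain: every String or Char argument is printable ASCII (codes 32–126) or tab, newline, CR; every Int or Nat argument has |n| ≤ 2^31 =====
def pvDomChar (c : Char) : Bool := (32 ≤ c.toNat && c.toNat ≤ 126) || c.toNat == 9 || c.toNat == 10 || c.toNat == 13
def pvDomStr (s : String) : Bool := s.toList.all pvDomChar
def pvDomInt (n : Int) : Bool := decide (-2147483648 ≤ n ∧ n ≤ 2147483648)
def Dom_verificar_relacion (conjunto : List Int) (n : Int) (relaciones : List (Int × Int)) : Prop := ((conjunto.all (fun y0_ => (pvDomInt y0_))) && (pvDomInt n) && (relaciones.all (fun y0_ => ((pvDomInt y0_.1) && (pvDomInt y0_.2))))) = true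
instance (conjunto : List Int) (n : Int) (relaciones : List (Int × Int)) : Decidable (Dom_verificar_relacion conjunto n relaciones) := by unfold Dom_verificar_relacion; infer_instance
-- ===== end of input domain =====

-- B replaces A's O(n^3) scans (list membership inside nested loops) by a set of the pairs
-- plus a successor index keyed by first element; equivalence of the returned string is proved.

-- ===== PORT A =====
def es_reflexiva (relacion : List (Int × Int)) (conjunto : List Int) : Bool :=
  -- for elemento in conjunto: any((a,b) in relacion for a,b in relacion if a==e and b==e); early False
  conjunto.all (fun elemento =>
    (relacion.filter (fun p => p.1 == elemento && p.2 == elemento)).any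
      (fun p => relacion.contains p))

def verificar_relacion (conjunto : List Int) (n : Int) (relaciones : List (Int × Int)) : String :=
  let reflexiva := es_reflexiva relaciones conjunto
  let simetrica := relaciones.foldl
    (fun s p => if !(relaciones.contains (p.2, p.1)) then false else s) true
  let transitiva := relaciones.foldl
    (fun t p => relaciones.foldl
      (fun t q => if p.2 == q.1 && !(relaciones.contains (p.1, q.2)) then false else t) t) true
  if reflexiva && simetrica && transitiva then "Equivalencia"
  else if reflexiva then "Reflexiva"
  else if simetrica then "Simétrica"
  else if transitiva then "Transitiva"
  else "No"

-- ===== PORT B =====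
def verificar_relacion_alt (conjunto : List Int) (n : Int) (relaciones : List (Int × Int)) : String :=
  let rel : PySem.Set (Int × Int) := PySem.Set.ofList relaciones
  -- succ: dict indexing second components by first component (setdefault(a, []).append(b))
  let succ : PySem.Dict Int (List Int) :=
    rel.foldl (fun d p => d.modify p.1 [] (· ++ [p.2])) PySem.Dict.empty
  let reflexiva := conjunto.all (fun x => PySem.Set.contains rel (x, x))
  let simetrica := rel.all (fun p => PySem.Set.contains rel (p.2, p.1))
  let transitiva := rel.all (fun p =>
    (succ.getD p.2 []).all (fun d => PySem.Set.contains rel (p.1, d)))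
  if reflexiva && simetrica && transitiva then "Equivalencia"
  else if reflexiva then "Reflexiva"
  else if simetrica then "Simétrica"
  else if transitiva then "Transitiva"
  else "No"

-- ===== PRECONDITION & SPEC =====
def Spec_verificar_relacion (conjunto : List Int) (n : Int) (relaciones : List (Int × Int)) (out : String) : Prop := out = verificar_relacion_alt conjunto n relaciones
instance (conjunto : List Int) (n : Int) (relaciones : List (Int × Int)) (out : String) : Decidable (Spec_verificar_relacion conjunto n relaciones out) := by unfold Spec_verificar_relacion; infer_instance

-- ===== CLAIM (what is proved, stated in full; the proofs are below) =====
def Claim_equal_verificar_relacion : Prop := ∀ (conjunto : List Int) (n : Int) (relaciones : List (Int × Int)), Dom_verificar_relacion conjunto n relaciones → Spec_verificar_relacion conjunto n relaciones (verificar_relacion conjunto n relaciones)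

-- ===== LEMMAS AND PROOFS =====

-- A's "set a flag to False, never back" loop is an all.
theorem foldl_flag {α : Type} (l : List α) (c : α → Bool) (init : Bool) :
    l.foldl (fun s x => if c x then false else s) init = (init && l.all (fun x => !c x)) := by
  induction l generalizing init with
  | nil => simp
  | cons a l ih =>
    simp only [List.foldl_cons, List.all_cons, ih]
    cases hca : c a <;> cases init <;> simp [hca]

-- flag && accumulation is an all.
theorem foldl_and {α : Type} (l : List α) (g : α → Bool) (init : Bool) :
    l.foldl (fun t p => t && g p) init = (init && l.all g) := by
  induction l generalizing init with
  | nil => simp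
  | cons a l ih => simp only [List.foldl_cons, List.all_cons, ih]; cases init <;> simp

-- A's nested flag loop is a nested all.
theorem foldl_flag2 {α : Type} (l l2 : List α) (c : α → α → Bool) (init : Bool) :
    l.foldl (fun t p => l2.foldl (fun t q => if c p q then false else t) t) init
      = (init && l.all (fun p => l2.all (fun q => !c p q))) := by
  calc l.foldl (fun t p => l2.foldl (fun t q => if c p q then false else t) t) init
      = l.foldl (fun t p => t && l2.all (fun q => !c p q)) init := by
        congr 1; funext t p; exact foldl_flag l2 (c p) t
    _ = (init && l.all (fun p => l2.all (fun q => !c p q))) := foldl_and ..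

theorem refl_eq (conjunto : List Int) (R : List (Int × Int)) :
    es_reflexiva R conjunto
      = conjunto.all (fun x => PySem.Set.contains (PySem.Set.ofList R) (x, x)) := by
  unfold es_reflexiva
  rw [Bool.eq_iff_iff]
  simp only [List.all_eq_true, List.any_eq_true, List.mem_filter, Bool.and_eq_true, beq_iff_eq,
    List.contains_iff_mem, PySem.Set.contains_iff, PySem.Set.mem_ofList]
  constructor <;> intro h x hx
  · obtain ⟨p, ⟨hp, h1, h2⟩, _⟩ := h x hx
    cases p; simp_all
  · exact ⟨(x, x), ⟨h x hx, rfl, rfl⟩, h x hx⟩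

theorem sym_eq (R : List (Int × Int)) :
    R.foldl (fun s p => if !(R.contains (p.2, p.1)) then false else s) true
      = (PySem.Set.ofList R).all
          (fun p => PySem.Set.contains (PySem.Set.ofList R) (p.2, p.1)) := by
  rw [foldl_flag R (fun p => !(R.contains (p.2, p.1))) true, Bool.eq_iff_iff]
  simp [List.all_eq_true, PySem.Set.mem_ofList]

theorem trans_eq (R : List (Int × Int)) :
    R.foldl (fun t p => R.foldl
        (fun t q => if p.2 == q.1 && !(R.contains (p.1, q.2)) then false else t) t) true
      = (PySem.Set.ofList R).all (fun p =>
          (((PySem.Set.ofList R).foldl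
              (fun d q => d.modify q.1 [] (· ++ [q.2])) PySem.Dict.empty).getD p.2 []).all
            (fun d => PySem.Set.contains (PySem.Set.ofList R) (p.1, d))) := by
  rw [foldl_flag2 R R (fun p q => p.2 == q.1 && !(R.contains (p.1, q.2))) true, Bool.eq_iff_iff]
  simp only [Bool.true_and, List.all_eq_true, PySem.Dict.getD_foldl_modify_append,
    PySem.Dict.getD_empty, List.mem_map, List.mem_filter, PySem.Set.contains_iff,
    PySem.Set.mem_ofList, Bool.not_eq_eq_eq_not, Bool.not_true,
    Bool.and_eq_false_iff, beq_iff_eq, List.nil_append]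
  constructor
  · rintro h p hp d ⟨q, ⟨hq, hq1⟩, rfl⟩
    rcases h p hp q hq with h1 | h2
    · exact absurd hq1.symm (by simpa using h1)
    · simpa using h2
  · intro h p hp q hq
    by_cases he : p.2 = q.1
    · right
      simpa using h p hp q.2 ⟨q, ⟨hq, he.symm⟩, rfl⟩
    · left; simpa using he

-- ===== VERDICT (by name: the statement is the Claim_ definition above) =====
theorem verificar_relacion_spec : Claim_equal_verificar_relacion := by
  intro conjunto n R _
  unfold Spec_verificar_relacion verificar_relacion verificar_relacion_alt
  rw [refl_eq, sym_eq, trans_eq]
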